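-- pv_equiv track=rewrite | github.com/dorshamo/MLM | HW/hw4/untitled0.py | sym_not_coprime
-- ===== SOURCE A (Python) =====
-- def gcd(x,y):
--     if y == 0:
--         return x
--     return gcd(y,x % y)
--
-- def sym_not_coprime(lst):
--     n = len(lst)
--     if lst ==[]:
--         return True
--
--     elif gcd(lst[0], lst[n-1]) !=1:
--         return sym_not_coprime(lst[1:-1])
--     else:
--         if n == 1:
--             return True
--         else:
--             False
--
--     b = True
--     n = len(lst)
--     if lst == []:
--         return b
--     elif gcd(lst[0], lst[n-1]) != 1:
--         lst = lst[1:-1]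
--         b = sym_not_coprime(lst)
--         return b
--     else:
--         if lst[0] != 1 and lst[n-1] != 1:
--             b = False
--         return b
-- ===== SOURCE B (Python) =====
-- def gcd(x, y):
--     if y == 0:
--         return x
--     return gcd(y, x % y)
--
-- def sym_not_coprime(lst):
--     i, j = 0, len(lst) - 1
--     while i < j:
--         if gcd(lst[i], lst[j]) != 1:
--             i += 1
--             j -= 1
--         else:
--             return lst[i] == 1 or lst[j] == 1
--     return True
-- ===== Notes on version B (the rewrite author's own statement) =====
-- stated objective: faster
-- what changed: Replaces A's recursion on repeatedly re-sliced list copies (with a dead-code fall-through into a duplicated second block) by a single in-place two-pointer loop over indices; same gcd helper.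
import Mathlib
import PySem

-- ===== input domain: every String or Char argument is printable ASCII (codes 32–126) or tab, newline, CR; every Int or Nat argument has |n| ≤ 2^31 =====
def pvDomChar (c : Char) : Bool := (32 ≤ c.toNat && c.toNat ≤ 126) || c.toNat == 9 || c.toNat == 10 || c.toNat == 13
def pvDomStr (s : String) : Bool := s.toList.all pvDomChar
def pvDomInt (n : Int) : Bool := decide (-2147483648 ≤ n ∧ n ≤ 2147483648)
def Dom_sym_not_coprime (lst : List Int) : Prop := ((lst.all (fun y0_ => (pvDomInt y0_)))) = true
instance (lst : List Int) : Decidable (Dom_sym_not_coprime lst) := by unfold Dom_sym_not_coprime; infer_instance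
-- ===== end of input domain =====

-- B replaces A's recursion on repeatedly re-sliced lists (with its dead-code fall-through into a
-- duplicated second block) by a single in-place two-pointer loop over indices (no slice copies); objective: faster.

-- shared helper: both Python files define the identical recursive gcd (Python '%' = floor mod)
def gcd_py (x y : Int) : Int :=
  if y = 0 then x
  else gcd_py y (PySem.Int.mod x y)
termination_by y.natAbs
decreasing_by
  rename_i hy
  rcases lt_or_gt_of_ne hy with h | h
  · have := PySem.Int.mod_neg_bounds x h
    omega
  · have h1 := PySem.Int.mod_nonneg x h
    have h2 := PySem.Int.mod_lt x h
    omega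

-- ===== PORT A =====
-- lst[0] / lst[n-1] are in range whenever read (guarded by lst ≠ []), so pyGetD is exact here;
-- lst[1:-1] is PySem.List.slice lst 1 (-1).
def sym_not_coprime (lst : List Int) : Bool :=
  let n : Int := lst.length
  if lst = [] then true
  else if gcd_py (PySem.List.pyGetD lst 0 0) (PySem.List.pyGetD lst (n - 1) 0) ≠ 1 then
    sym_not_coprime (PySem.List.slice lst (some 1) (some (-1)))
  else if n = 1 then true
  else
    -- Python's 'else: False' returns nothing: control falls through to the duplicated block below
    let b := true
    let n : Int := lst.length
    if lst = [] then b
    else if gcd_py (PySem.List.pyGetD lst 0 0) (PySem.List.pyGetD lst (n - 1) 0) ≠ 1 then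
      sym_not_coprime (PySem.List.slice lst (some 1) (some (-1)))
    else
      let b := if PySem.List.pyGetD lst 0 0 ≠ 1 ∧ PySem.List.pyGetD lst (n - 1) 0 ≠ 1 then false else b
      b
termination_by lst.length
decreasing_by
  all_goals
    cases lst with
    | nil => simp_all
    | cons a t => simp [PySem.List.slice]

-- ===== PORT B =====
-- two-pointer loop: while i < j (indices stay in range: 0 ≤ i < j ≤ len-1, so getD is exact)
def sncLoop (lst : List Int) (i j : Nat) : Bool :=
  if i < j then
    if gcd_py (lst.getD i 0) (lst.getD j 0) ≠ 1 then
      sncLoop lst (i + 1) (j - 1)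
    else
      lst.getD i 0 == 1 || lst.getD j 0 == 1
  else true
termination_by j - i

def sym_not_coprime_alt (lst : List Int) : Bool :=
  sncLoop lst 0 (lst.length - 1)

-- ===== PRECONDITION & SPEC =====
def Spec_sym_not_coprime (lst : List Int) (out : Bool) : Prop := out = sym_not_coprime_alt lst
instance (lst : List Int) (out : Bool) : Decidable (Spec_sym_not_coprime lst out) := by unfold Spec_sym_not_coprime; infer_instance

-- ===== CLAIM (what is proved, stated in full; the proofs are below) =====
def Claim_equal_sym_not_coprime : Prop := ∀ (lst : List Int), Dom_sym_not_coprime lst → Spec_sym_not_coprime lst (sym_not_coprime lst)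

-- ===== LEMMAS AND PROOFS =====

theorem slice_one_neg_one (xs : List Int) :
    PySem.List.slice xs (some 1) (some (-1)) = xs.tail.dropLast := by
  simp [PySem.List.slice, List.dropLast_eq_take]
  cases xs <;> simp

theorem mid_getD (xs : List Int) (k : Nat) (hk : k + 2 < xs.length) :
    xs.tail.dropLast.getD k 0 = xs.getD (k + 1) 0 := by
  simp [List.getD, List.getElem?_dropLast, List.getElem?_tail]
  rw [if_pos (by omega)]

theorem snc_shift (lst : List Int) (d : Nat) :
    ∀ i j : Nat, j ≤ i + d → j + 3 ≤ lst.length →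
      sncLoop lst (i + 1) (j + 1) = sncLoop lst.tail.dropLast i j := by
  induction d with
  | zero =>
    intro i j h _
    conv_lhs => rw [sncLoop.eq_def]
    conv_rhs => rw [sncLoop.eq_def]
    rw [if_neg (show ¬ i + 1 < j + 1 by omega), if_neg (show ¬ i < j by omega)]
  | succ d ih =>
    intro i j h hl
    conv_lhs => rw [sncLoop.eq_def]
    conv_rhs => rw [sncLoop.eq_def]
    by_cases hij : i < j
    · rw [if_pos (show i + 1 < j + 1 by omega), if_pos hij]
      rw [mid_getD lst i (by omega), mid_getD lst j (by omega)]
      by_cases hg : gcd_py (lst.getD (i + 1) 0) (lst.getD (j + 1) 0) ≠ 1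
      · rw [if_pos hg, if_pos hg]
        have hj1 : j + 1 - 1 = (j - 1) + 1 := by omega
        rw [hj1, ih (i + 1) (j - 1) (by omega) (by omega)]
      · rw [if_neg hg, if_neg hg]
    · rw [if_neg (show ¬ i + 1 < j + 1 by omega), if_neg hij]

theorem snc_main (lst : List Int) :
    sym_not_coprime lst = sncLoop lst 0 (lst.length - 1) := by
  induction hn : lst.length using Nat.strong_induction_on generalizing lst with
  | _ n ih =>
  subst hn
  rw [sym_not_coprime]
  by_cases hnil : lst = []
  · subst hnil
    rw [if_pos rfl, sncLoop.eq_def]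
    simp
  · rw [if_neg hnil]
    have hlen : 1 ≤ lst.length := by
      cases lst with | nil => exact absurd rfl hnil | cons a t => simp
    have e0 : PySem.List.pyGetD lst 0 0 = lst.getD 0 0 := by
      simpa using PySem.List.pyGetD_natCast lst 0 0
    have elast : PySem.List.pyGetD lst ((lst.length : Int) - 1) 0 = lst.getD (lst.length - 1) 0 := by
      have h : ((lst.length : Int) - 1) = ((lst.length - 1 : Nat) : Int) := by omega
      rw [h]; exact PySem.List.pyGetD_natCast lst (lst.length - 1) 0
    rw [e0, elast, slice_one_neg_one]
    set a := lst.getD 0 0 with ha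
    set z := lst.getD (lst.length - 1) 0 with hz
    by_cases hg : gcd_py a z ≠ 1
    · rw [if_pos hg]
      have hmidlen : lst.tail.dropLast.length = lst.length - 2 := by
        cases lst with | nil => simp | cons x t => simp
      rw [ih (lst.tail.dropLast.length) (by omega) lst.tail.dropLast rfl, hmidlen]
      by_cases h2 : lst.length ≤ 2
      · -- mid is empty here: both sides are true
        conv_lhs => rw [sncLoop.eq_def]
        conv_rhs => rw [sncLoop.eq_def]
        rw [if_neg (show ¬ (0:Nat) < lst.length - 2 - 1 by omega)]
        by_cases h1 : lst.length = 1
        · rw [if_neg (show ¬ (0:Nat) < lst.length - 1 by omega)]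
        · -- length = 2: the loop runs once, then the indices cross
          rw [if_pos (show (0:Nat) < lst.length - 1 by omega)]
          have hl1 : lst.length - 1 = 1 := by omega
          rw [hl1] at hz
          rw [hl1, ← ha, ← hz, if_pos hg, sncLoop.eq_def]
          rw [if_neg (show ¬ (0:Nat) + 1 < 1 - 1 by omega)]
      · -- length ≥ 3: shift the loop window into the slice
        conv_rhs => rw [sncLoop.eq_def]
        rw [if_pos (show (0:Nat) < lst.length - 1 by omega), ← ha, ← hz, if_pos hg]
        have h1 : lst.length - 1 - 1 = (lst.length - 3) + 1 := by omega
        rw [h1, show (0:Nat) + 1 = 0 + 1 from rfl,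
            snc_shift lst (lst.length - 3) 0 (lst.length - 3) (by omega) (by omega)]
        congr 1
    · rw [if_neg hg]
      rw [not_ne_iff] at hg
      by_cases h1 : (lst.length : Int) = 1
      · rw [if_pos h1]
        conv_rhs => rw [sncLoop.eq_def]
        have hl1 : lst.length = 1 := by omega
        rw [if_neg (show ¬ (0:Nat) < lst.length - 1 by omega)]
      · rw [if_neg h1, if_neg hnil, elast, if_neg (by simpa using hg)]
        conv_rhs => rw [sncLoop.eq_def]
        rw [if_pos (show (0:Nat) < lst.length - 1 by omega), ← ha, ← hz,
            if_neg (show ¬ gcd_py a z ≠ 1 from not_ne_iff.mpr hg)]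
        by_cases hA : a = 1 <;> by_cases hZ : z = 1 <;> simp [hA, hZ]

-- ===== VERDICT (by name: the statement is the Claim_ definition above) =====
theorem sym_not_coprime_spec : Claim_equal_sym_not_coprime := by
  intro lst _
  unfold Spec_sym_not_coprime sym_not_coprime_alt
  exact snc_main lst
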